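-- pv_equiv track=rewrite | github.com/AlgoMathITMO/public-transport-network | ptn/preprocessing/osm.py | is_shop
-- ===== SOURCE A (Python) =====
-- from typing import List, Tuple, Dict, Optional, Set
--
-- def is_any_pair_present(tags: dict, items: List[Tuple[str, str]]) -> bool:
--     return isinstance(tags, dict) \
--            and any((key, value) in items for key, value in tags.items())
--
-- def is_shop(tags: dict) -> bool:
--     items = [
--         ('landuse', 'retail'),
--     ]
--     items += [('shop', val) for val in ['alcohol', 'antiques', 'appliance', 'art', 'bag',
--                                         'baker_supply', 'beauty', 'bicycle', 'binding', 'boat',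
--                                         'baby_goods', 'charity', 'chemist', 'clock', 'clothes',
--                                         'coffee', 'collector', 'consignment', 'convenience',
--                                         'cosmetics', 'curtain', 'dairy', 'deli', 'department_store',
--                                         'doityourself', 'energy', 'equipment', 'erotic', 'esoteric',
--                                         'fabric', 'family', 'farm', 'fireplace', 'fireworks',
--                                         'florist', 'food', 'funeral_directors', 'furniture',
--                                         'games', 'garden_centre', 'gas', 'gift', 'greengrocer',
--                                         'hardware', 'hearing_aids', 'houseware', 'internet-shop',
--                                         'jewelry', 'kids', 'kiosk', 'knife', 'lighting',
--                                         'locksmith', 'lottery', 'meat', 'military_shop', 'music',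
--                                         'numismatics', 'outdoor', 'paint', 'party', 'pet', 'photo',
--                                         'plants', 'plastic', 'pyrotechnics', 'second_hand',
--                                         'security', 'shoes', 'shop', 'smoke', 'storage_rental',
--                                         'supply', 'tools', 'toys', 'vacant', 'variety_store',
--                                         'video', 'wallpaper', 'watch']]
--
--     return is_any_pair_present(tags, items)
-- ===== SOURCE B (Python) =====
-- SHOP_VALUES = frozenset(
--     'alcohol antiques appliance art bag baker_supply beauty bicycle binding boat '
--     'baby_goods charity chemist clock clothes coffee collector consignment convenience '
--     'cosmetics curtain dairy deli department_store doityourself energy equipment erotic '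
--     'esoteric fabric family farm fireplace fireworks florist food funeral_directors '
--     'furniture games garden_centre gas gift greengrocer hardware hearing_aids houseware '
--     'internet-shop jewelry kids kiosk knife lighting locksmith lottery meat military_shop '
--     'music numismatics outdoor paint party pet photo plants plastic pyrotechnics '
--     'second_hand security shoes shop smoke storage_rental supply tools toys vacant '
--     'variety_store video wallpaper watch'.split())
--
-- def is_shop(tags: dict) -> bool:
--     return isinstance(tags, dict) and (tags.get('landuse') == 'retail'
--                                        or tags.get('shop') in SHOP_VALUES)
-- ===== Notes on version B (the rewrite author's own statement) =====
-- stated objective: idiomatic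
-- what changed: The scan over all tags.items() against a flat ~80-element pair list is removed entirely: B does two direct dict key lookups (tags.get('landuse'), tags.get('shop')) against a frozenset of shop values built once by splitting a space-separated literal.
import Mathlib
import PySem

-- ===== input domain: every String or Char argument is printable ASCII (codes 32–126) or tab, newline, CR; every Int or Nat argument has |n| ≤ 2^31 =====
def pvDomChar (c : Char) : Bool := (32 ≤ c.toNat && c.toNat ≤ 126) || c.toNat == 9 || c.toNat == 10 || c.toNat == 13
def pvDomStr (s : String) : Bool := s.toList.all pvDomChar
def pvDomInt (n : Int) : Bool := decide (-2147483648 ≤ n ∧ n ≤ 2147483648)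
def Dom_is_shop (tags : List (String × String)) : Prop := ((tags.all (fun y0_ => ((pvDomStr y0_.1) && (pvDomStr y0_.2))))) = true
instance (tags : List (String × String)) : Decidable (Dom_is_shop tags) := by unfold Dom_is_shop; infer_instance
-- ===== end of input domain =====

-- B replaces A's scan over all tag items against a ~80-element pair list by two direct
-- key lookups against a precomputed set of shop values (idiomatic; constant-factor faster).

-- ===== PORT A =====
-- the literal pair list A builds: ('landuse','retail') plus ('shop', val) for each shop value
def shopValueList : List String := ["alcohol", "antiques", "appliance", "art", "bag", "baker_supply", "beauty", "bicycle", "binding", "boat", "baby_goods", "charity", "chemist", "clock", "clothes", "coffee", "collector", "consignment", "convenience", "cosmetics", "curtain", "dairy", "deli", "department_store", "doityourself", "energy", "equipment", "erotic", "esoteric", "fabric", "family", "farm", "fireplace", "fireworks", "florist", "food", "funeral_directors", "furniture", "games", "garden_centre", "gas", "gift", "greengrocer", "hardware", "hearing_aids", "houseware", "internet-shop", "jewelry", "kids", "kiosk", "knife", "lighting", "locksmith", "lottery", "meat", "military_shop", "music", "numismatics", "outdoor", "paint", "party", "pet", "photo", "plants", "plastic", "pyrotechnics", "second_hand", "security",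 "shoes", "shop", "smoke", "storage_rental", "supply", "tools", "toys", "vacant", "variety_store", "video", "wallpaper", "watch"]

def shopItems : List (String × String) :=
  [("landuse", "retail")] ++ shopValueList.map (fun v => ("shop", v))

-- any((key, value) in items for key, value in tags.items())
def is_any_pair_present (tags : List (String × String)) (items : List (String × String)) : Bool :=
  tags.any (fun kv => items.contains kv)

def is_shop (tags : List (String × String)) : Bool :=
  is_any_pair_present tags shopItems

-- ===== PORT B =====
-- SHOP_VALUES = frozenset('alcohol antiques … watch'.split())
def SHOP_VALUES : PySem.Set String := PySem.Set.ofList (PySem.Str.split₀ "alcohol antiques appliance art bag baker_supply beauty bicycle binding boat baby_goods charity chemist clock clothes coffee collector consignment convenience cosmetics curtain dairy deli department_store doityourself energy equipment erotic esoteric fabric family farm fireplace fireworks florist food funeral_directors furniture games garden_centre gas gift greengrocer hardware hearing_aids houseware internet-shop jewelry kids kiosk knife lighting locksmith lottery meat military_shop music numismatics outdoor paint party pet photo plants plastic pyrotechnics second_hand security shoes shop smoke storage_rental supply tools toys vacant variety_store video wallpaper watch")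

-- tags.get('landuse') == 'retail' or tags.get('shop') in SHOP_VALUES
def is_shop_alt (tags : List (String × String)) : Bool :=
  ((PySem.Dict.mk tags).get? "landuse" == some "retail") ||
    (match (PySem.Dict.mk tags).get? "shop" with
     | some v => SHOP_VALUES.contains v
     | none => false)

-- ===== PRECONDITION & SPEC =====
-- Pre_ excludes association lists with duplicate keys: a Python dict cannot contain them,
-- so such lists do not represent any input of A (dict construction collapses duplicates).
def Pre_is_shop (tags : List (String × String)) : Prop := (tags.map Prod.fst).Nodup
instance (tags : List (String × String)) : Decidable (Pre_is_shop tags) := by unfold Pre_is_shop; infer_instance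

def pvWitness_is_shop : (List (String × String)) := [("shop", "alcohol"), ("name", "x")]

def Spec_is_shop (tags : List (String × String)) (out : Bool) : Prop := out = is_shop_alt tags
instance (tags : List (String × String)) (out : Bool) : Decidable (Spec_is_shop tags out) := by unfold Spec_is_shop; infer_instance

-- ===== CLAIM (what is proved, stated in full; the proofs are below) =====
def Claim_equal_is_shop : Prop := ∀ (tags : List (String × String)), Dom_is_shop tags → Pre_is_shop tags → Spec_is_shop tags (is_shop tags)

-- ===== LEMMAS AND PROOFS =====

-- the split of B's space-separated literal is exactly A's value list
set_option maxRecDepth 8000 in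
set_option maxHeartbeats 2000000 in
lemma split_eq_list : PySem.Str.split₀ "alcohol antiques appliance art bag baker_supply beauty bicycle binding boat baby_goods charity chemist clock clothes coffee collector consignment convenience cosmetics curtain dairy deli department_store doityourself energy equipment erotic esoteric fabric family farm fireplace fireworks florist food funeral_directors furniture games garden_centre gas gift greengrocer hardware hearing_aids houseware internet-shop jewelry kids kiosk knife lighting locksmith lottery meat military_shop music numismatics outdoor paint party pet photo plants plastic pyrotechnics second_hand security shoes shop smoke storage_rental supply tools toys vacant variety_store video wallpaper watch" = shopValueList := by
  decide

-- membership of a pair in the mapped ('shop', val) list, per component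
lemma contains_map_shop (l : List String) (k v : String) :
    ((l.map (fun s => ("shop", s)) : List (String × String)).contains (k, v))
      = (k == "shop" && l.contains v) := by
  rw [Bool.eq_iff_iff]
  simp only [List.contains_eq_mem, decide_eq_true_eq, List.mem_map, Bool.and_eq_true,
    beq_iff_eq, Prod.ext_iff]
  constructor
  · rintro ⟨s, hs, hk, hv⟩
    exact ⟨hk.symm, hv ▸ hs⟩
  · rintro ⟨hk, hv⟩
    exact ⟨v, hv, hk.symm, rfl⟩

-- membership in A's pair list, characterised per key
lemma mem_shopItems (k v : String) :
    shopItems.contains (k, v)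
      = ((k == "landuse" && v == "retail") || (k == "shop" && shopValueList.contains v)) := by
  unfold shopItems
  rw [List.contains_append, List.contains_cons, contains_map_shop]
  rw [Bool.eq_iff_iff]
  simp [Prod.ext_iff]

lemma get_none (r : List (String × String)) (key : String)
    (h : key ∉ r.map Prod.fst) : (PySem.Dict.mk r).get? key = none := by
  induction r with
  | nil => rfl
  | cons hd tl ih =>
    obtain ⟨k, v⟩ := hd
    simp only [List.map_cons, List.mem_cons, not_or] at h
    rw [PySem.Dict.get?_mk_cons]
    rw [if_neg (by simp only [beq_iff_eq]; exact fun e => h.1 e.symm), ih h.2]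

lemma set_contains_eq (v : String) :
    SHOP_VALUES.contains v = shopValueList.contains v := by
  have h : SHOP_VALUES = PySem.Set.ofList shopValueList := by
    unfold SHOP_VALUES
    rw [split_eq_list]
  rw [h, Bool.eq_iff_iff]
  simp [PySem.Set.contains, PySem.Set.mem_ofList, List.contains_eq_mem]

lemma main_lemma (tags : List (String × String)) (h : (tags.map Prod.fst).Nodup) :
    is_shop tags = is_shop_alt tags := by
  induction tags with
  | nil => rfl
  | cons hd tl ih =>
    obtain ⟨k, v⟩ := hd
    simp only [List.map_cons, List.nodup_cons] at h
    have ih' := ih h.2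
    simp only [is_shop, is_any_pair_present, List.any_cons, mem_shopItems] at *
    simp only [is_shop_alt, PySem.Dict.get?_mk_cons, set_contains_eq] at *
    by_cases h1 : k = "landuse"
    · subst h1
      have hn : (PySem.Dict.mk tl).get? "landuse" = none := get_none tl "landuse" h.1
      simp only [hn] at ih' ⊢
      simp only [beq_self_eq_true, Bool.true_and, reduceIte]
      rw [if_neg (by decide)]
      rw [ih']
      cases hv : v == "retail" <;> simp [hv]
    · by_cases h2 : k = "shop"
      · subst h2
        have hn : (PySem.Dict.mk tl).get? "shop" = none := get_none tl "shop" h.1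
        simp only [hn] at ih' ⊢
        simp only [beq_self_eq_true, Bool.true_and, reduceIte]
        rw [if_neg (by decide)]
        rw [ih']
        cases hv : shopValueList.contains v <;> simp
      · have e1 : (k == "landuse") = false := by simp [h1]
        have e2 : (k == "shop") = false := by simp [h2]
        simp only [e1, e2, Bool.false_and, Bool.false_or, if_neg, Bool.false_eq_true,
          not_false_eq_true]
        exact ih'

-- ===== VERDICT (by name: the statement is the Claim_ definition above) =====
theorem is_shop_spec : Claim_equal_is_shop := by
  intro tags _ hpre
  unfold Spec_is_shop
  exact main_lemma tags hpre
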